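-- pv_equiv track=rewrite | github.com/hajimes/mmh3 | src/mmh3/_mmh3/refresh.py | lowercase_function_names
-- ===== SOURCE A (Python) =====
-- def lowercase_function_names(subcode: str) -> str:
--     """Lowercase functions names. Purely for style.
--
--     Args:
--         subcode (str): The code to be transformed.
--
--     Returns:
--         str: The transformed code.
--     """
--
--     function_names = [
--         "MurmurHash3_x86_32",
--         "MurmurHash3_x86_128",
--         "MurmurHash3_x64_128",
--     ]
--
--     for fn in function_names:
--         subcode = subcode.replace(fn, fn.lower())
--
--     return subcode
-- ===== SOURCE B (Python) =====
-- def lowercase_function_names(subcode: str) -> str: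
--     """Single left-to-right scan: at each position emit the lowercased name
--     if one of the three names starts there, else copy the character."""
--     names = (
--         "MurmurHash3_x86_32",
--         "MurmurHash3_x86_128",
--         "MurmurHash3_x64_128",
--     )
--     out = []
--     i = 0
--     n = len(subcode)
--     while i < n:
--         for name in names:
--             if subcode.startswith(name, i):
--                 out.append(name.lower())
--                 i += len(name)
--                 break
--         else:
--             out.append(subcode[i])
--             i += 1
--     return "".join(out)
-- ===== Notes on version B (the rewrite author's own statement) =====
-- stated objective: alternative
-- what changed: A makes three sequential whole-string str.replace passes (one per function name); B does one left-to-right scan that, at each position, emits the lowercased name if one of the three names starts there and otherwise copies the character.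
import Mathlib
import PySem

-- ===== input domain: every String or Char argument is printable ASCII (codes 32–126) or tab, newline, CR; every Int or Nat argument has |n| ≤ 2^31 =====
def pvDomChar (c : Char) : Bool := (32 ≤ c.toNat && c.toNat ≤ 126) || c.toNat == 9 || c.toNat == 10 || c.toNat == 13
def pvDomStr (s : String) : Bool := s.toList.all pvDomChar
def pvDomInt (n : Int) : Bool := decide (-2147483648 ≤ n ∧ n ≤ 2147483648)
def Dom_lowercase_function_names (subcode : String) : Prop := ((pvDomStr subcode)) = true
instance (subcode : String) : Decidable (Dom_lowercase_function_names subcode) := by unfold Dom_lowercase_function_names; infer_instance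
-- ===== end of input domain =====

-- B replaces A's three sequential whole-string replace passes by one left-to-right scan that
-- lowercases whichever of the three names starts at the current position (objective: alternative).

-- ===== PORT A =====
def lowercase_function_names (subcode : String) : String :=
  ["MurmurHash3_x86_32", "MurmurHash3_x86_128", "MurmurHash3_x64_128"].foldl
    (fun s fn => PySem.Str.replace s fn (PySem.Str.lower fn)) subcode

-- ===== PORT B =====
def pvName1 : List Char := "MurmurHash3_x86_32".toList
def pvName2 : List Char := "MurmurHash3_x86_128".toList
def pvName3 : List Char := "MurmurHash3_x64_128".toList

-- single pass: at each position the first of the three names that starts there is emitted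
-- lowercased (and skipped), otherwise the character is copied (Source B's while/for-else loop)
def pvScan : List Char → List Char
  | [] => []
  | c :: t =>
    if pvName1.isPrefixOf (c :: t) then
      PySem.Chars.lower pvName1 ++ pvScan ((c :: t).drop pvName1.length)
    else if pvName2.isPrefixOf (c :: t) then
      PySem.Chars.lower pvName2 ++ pvScan ((c :: t).drop pvName2.length)
    else if pvName3.isPrefixOf (c :: t) then
      PySem.Chars.lower pvName3 ++ pvScan ((c :: t).drop pvName3.length)
    else c :: pvScan t
  termination_by l => l.length
  decreasing_by all_goals simp [pvName1, pvName2, pvName3]; try omega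


def lowercase_function_names_alt (subcode : String) : String :=
  String.ofList (pvScan subcode.toList)

-- ===== PRECONDITION & SPEC =====
def Spec_lowercase_function_names (subcode : String) (out : String) : Prop := out = lowercase_function_names_alt subcode
instance (subcode : String) (out : String) : Decidable (Spec_lowercase_function_names subcode out) := by unfold Spec_lowercase_function_names; infer_instance

-- ===== CLAIM (what is proved, stated in full; the proofs are below) =====
def Claim_equal_lowercase_function_names : Prop := ∀ (subcode : String), Dom_lowercase_function_names subcode → Spec_lowercase_function_names subcode (lowercase_function_names subcode)

-- ===== LEMMAS AND PROOFS =====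
def pvPat1 : List Char := pvName1.drop 1
def pvPat2 : List Char := pvName2.drop 1
def pvPat3 : List Char := pvName3.drop 1
def pvLow1 : List Char := PySem.Chars.lower pvName1
def pvLow2 : List Char := PySem.Chars.lower pvName2
def pvLow3 : List Char := PySem.Chars.lower pvName3

lemma pvName1_cons : pvName1 = 'M' :: pvPat1 := by decide
lemma pvName2_cons : pvName2 = 'M' :: pvPat2 := by decide
lemma pvName3_cons : pvName3 = 'M' :: pvPat3 := by decide
lemma pvName1_len : pvName1.length = 18 := by decide
lemma pvName2_len : pvName2.length = 19 := by decide
lemma pvName3_len : pvName3.length = 19 := by decide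
lemma pvLow1_len : pvLow1.length = 18 := by decide
lemma pvLow2_len : pvLow2.length = 19 := by decide

lemma pvFactQ2a : ∀ k, k < 19 → 1 ≤ k → ¬ pvName2.drop k <+: pvLow1 := by decide
lemma pvFactQ2b : ∀ k, k < 19 → 1 ≤ k → ¬ pvName2.drop k <+: pvName2 := by decide
lemma pvFactQ2c : ∀ k, k < 19 → 1 ≤ k → ¬ pvName2.drop k <+: pvName3 := by decide
lemma pvFactQ3a : ∀ k, k < 19 → 1 ≤ k → ¬ pvName3.drop k <+: pvLow1 := by decide
lemma pvFactQ3b : ∀ k, k < 19 → 1 ≤ k → ¬ pvName3.drop k <+: pvLow2 := by decide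
lemma pvFactQ3c : ∀ k, k < 19 → 1 ≤ k → ¬ pvName3.drop k <+: pvName3 := by decide
lemma pvMnotLow1 : 'M' ∉ pvLow1 := by decide
lemma pvMnotLow2 : 'M' ∉ pvLow2 := by decide
lemma pvMnotTail2 : 'M' ∉ pvName2.drop 1 := by decide
lemma pvMnotTail3 : 'M' ∉ pvName3.drop 1 := by decide

def pvGen (r1 r2 r3 : List Char) : List Char → List Char
  | [] => []
  | c :: t =>
    if pvName1.isPrefixOf (c :: t) then r1 ++ pvGen r1 r2 r3 ((c :: t).drop pvName1.length)
    else if pvName2.isPrefixOf (c :: t) then r2 ++ pvGen r1 r2 r3 ((c :: t).drop pvName2.length)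
    else if pvName3.isPrefixOf (c :: t) then r3 ++ pvGen r1 r2 r3 ((c :: t).drop pvName3.length)
    else c :: pvGen r1 r2 r3 t
  termination_by l => l.length
  decreasing_by all_goals simp [pvName1, pvName2, pvName3]; try omega

lemma pvGen_m1 (r1 r2 r3 u) : pvGen r1 r2 r3 (pvName1 ++ u) = r1 ++ pvGen r1 r2 r3 u := by
  rw [pvName1_cons, List.cons_append, pvGen,
    if_pos (by rw [List.isPrefixOf_iff_prefix, ← List.cons_append, ← pvName1_cons]; exact List.prefix_append _ _)]
  rw [← List.cons_append, ← pvName1_cons, List.drop_left]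

lemma pvGen_m2 (r1 r2 r3 u) (h1 : ¬ pvName1 <+: pvName2 ++ u) :
    pvGen r1 r2 r3 (pvName2 ++ u) = r2 ++ pvGen r1 r2 r3 u := by
  rw [pvName2_cons, List.cons_append, pvGen,
    if_neg (by rw [List.isPrefixOf_iff_prefix, ← List.cons_append, ← pvName2_cons]; exact h1),
    if_pos (by rw [List.isPrefixOf_iff_prefix, ← List.cons_append, ← pvName2_cons]; exact List.prefix_append _ _)]
  rw [← List.cons_append, ← pvName2_cons, List.drop_left]

lemma pvGen_m3 (r1 r2 r3 u) (h1 : ¬ pvName1 <+: pvName3 ++ u) (h2 : ¬ pvName2 <+: pvName3 ++ u) :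
    pvGen r1 r2 r3 (pvName3 ++ u) = r3 ++ pvGen r1 r2 r3 u := by
  rw [pvName3_cons, List.cons_append, pvGen,
    if_neg (by rw [List.isPrefixOf_iff_prefix, ← List.cons_append, ← pvName3_cons]; exact h1),
    if_neg (by rw [List.isPrefixOf_iff_prefix, ← List.cons_append, ← pvName3_cons]; exact h2),
    if_pos (by rw [List.isPrefixOf_iff_prefix, ← List.cons_append, ← pvName3_cons]; exact List.prefix_append _ _)]
  rw [← List.cons_append, ← pvName3_cons, List.drop_left]

lemma pvGen_cons (r1 r2 r3 : List Char) (c : Char) (t : List Char)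
    (h1 : ¬ pvName1 <+: (c :: t)) (h2 : ¬ pvName2 <+: (c :: t)) (h3 : ¬ pvName3 <+: (c :: t)) :
    pvGen r1 r2 r3 (c :: t) = c :: pvGen r1 r2 r3 t := by
  rw [pvGen,
    if_neg (by rw [List.isPrefixOf_iff_prefix]; exact h1),
    if_neg (by rw [List.isPrefixOf_iff_prefix]; exact h2),
    if_neg (by rw [List.isPrefixOf_iff_prefix]; exact h3)]

lemma pvScan_m1 (u : List Char) : pvScan (pvName1 ++ u) = pvLow1 ++ pvScan u := by
  rw [pvName1_cons, List.cons_append, pvScan,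
    if_pos (by rw [List.isPrefixOf_iff_prefix, ← List.cons_append, ← pvName1_cons]; exact List.prefix_append _ _)]
  rw [← List.cons_append, ← pvName1_cons, List.drop_left]; rfl

lemma pvScan_m2 (u : List Char) (h1 : ¬ pvName1 <+: pvName2 ++ u) :
    pvScan (pvName2 ++ u) = pvLow2 ++ pvScan u := by
  rw [pvName2_cons, List.cons_append, pvScan,
    if_neg (by rw [List.isPrefixOf_iff_prefix, ← List.cons_append, ← pvName2_cons]; exact h1),
    if_pos (by rw [List.isPrefixOf_iff_prefix, ← List.cons_append, ← pvName2_cons]; exact List.prefix_append _ _)]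
  rw [← List.cons_append, ← pvName2_cons, List.drop_left]; rfl

lemma pvScan_m3 (u : List Char) (h1 : ¬ pvName1 <+: pvName3 ++ u) (h2 : ¬ pvName2 <+: pvName3 ++ u) :
    pvScan (pvName3 ++ u) = pvLow3 ++ pvScan u := by
  rw [pvName3_cons, List.cons_append, pvScan,
    if_neg (by rw [List.isPrefixOf_iff_prefix, ← List.cons_append, ← pvName3_cons]; exact h1),
    if_neg (by rw [List.isPrefixOf_iff_prefix, ← List.cons_append, ← pvName3_cons]; exact h2),
    if_pos (by rw [List.isPrefixOf_iff_prefix, ← List.cons_append, ← pvName3_cons]; exact List.prefix_append _ _)]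
  rw [← List.cons_append, ← pvName3_cons, List.drop_left]; rfl

lemma pvScan_cons (c : Char) (t : List Char)
    (h1 : ¬ pvName1 <+: (c :: t)) (h2 : ¬ pvName2 <+: (c :: t)) (h3 : ¬ pvName3 <+: (c :: t)) :
    pvScan (c :: t) = c :: pvScan t := by
  rw [pvScan,
    if_neg (by rw [List.isPrefixOf_iff_prefix]; exact h1),
    if_neg (by rw [List.isPrefixOf_iff_prefix]; exact h2),
    if_neg (by rw [List.isPrefixOf_iff_prefix]; exact h3)]

def pvRepl (o : Char) (pat new : List Char) : List Char → List Char
  | [] => []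
  | c :: t =>
    if (o :: pat).isPrefixOf (c :: t) then new ++ pvRepl o pat new (t.drop pat.length)
    else c :: pvRepl o pat new t
  termination_by l => l.length
  decreasing_by all_goals simp; try omega

lemma pvGo_eq (o : Char) (pat new : List Char) :
    ∀ (fuel : Nat) (l acc : List Char), l.length ≤ fuel →
      PySem.Chars.replace.go (o :: pat) new fuel l acc = acc.reverse ++ pvRepl o pat new l := by
  intro fuel
  induction fuel with
  | zero =>
    intro l acc h
    have : l = [] := List.eq_nil_of_length_eq_zero (Nat.le_zero.mp h)
    subst this
    simp [PySem.Chars.replace.go, pvRepl]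
  | succ n ih =>
    intro l acc h
    match l with
    | [] => simp [PySem.Chars.replace.go, pvRepl]
    | c :: t =>
      rw [PySem.Chars.replace.go]
      by_cases hp : (o :: pat).isPrefixOf (c :: t)
      · rw [if_pos hp]
        rw [pvRepl, if_pos hp]
        have hlen : (List.drop (o :: pat).length (c :: t)).length ≤ n := by
          simp at h ⊢; omega
        rw [ih _ _ hlen]
        simp [List.drop_succ_cons]
      · rw [if_neg hp]
        rw [pvRepl, if_neg hp]
        have hlen : t.length ≤ n := by simp at h; omega
        rw [ih _ _ hlen]
        simp

lemma pvReplace_eq (o : Char) (pat new s : List Char) :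
    PySem.Chars.replace s (o :: pat) new = pvRepl o pat new s := by
  rw [PySem.Chars.replace]
  simp [pvGo_eq o pat new s.length s [] le_rfl]

lemma pvRepl_match (o : Char) (pat new x : List Char) :
    pvRepl o pat new ((o :: pat) ++ x) = new ++ pvRepl o pat new x := by
  rw [List.cons_append, pvRepl, if_pos (by simp [List.isPrefixOf_iff_prefix]),
    List.drop_left]

lemma pvRepl_cons_of_not {o : Char} {pat : List Char} (new : List Char) {c : Char} {t : List Char}
    (h : ¬ (o :: pat) <+: (c :: t)) :
    pvRepl o pat new (c :: t) = c :: pvRepl o pat new t := by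
  rw [pvRepl, if_neg (by simpa [List.isPrefixOf_iff_prefix] using h)]

lemma pvRepl_skip (o : Char) (pat new : List Char) :
    ∀ (a x : List Char), (∀ i, i < a.length → ¬ (o :: pat) <+: (a.drop i ++ x)) →
      pvRepl o pat new (a ++ x) = a ++ pvRepl o pat new x := by
  intro a
  induction a with
  | nil => simp
  | cons c a' ih =>
    intro x H
    have h0 : ¬ (o :: pat) <+: (c :: (a' ++ x)) := by
      have := H 0 (by simp); simpa using this
    rw [List.cons_append, pvRepl_cons_of_not new h0,
      ih x (fun i hi => by simpa using H (i + 1) (by simpa using Nat.succ_lt_succ hi))]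
    simp

lemma pvPrefixOfAppend {q a x : List Char} (h : q <+: a ++ x) (hlen : q.length ≤ a.length) :
    q <+: a := by
  rw [List.prefix_iff_eq_take] at h ⊢
  rwa [List.take_append_of_le_length hlen] at h

lemma pvNoHead (o : Char) (pat a x : List Char) (hM : o ∉ a) :
    ∀ i, i < a.length → ¬ (o :: pat) <+: (a.drop i ++ x) := by
  intro i hi hp
  rw [List.drop_eq_getElem_cons hi, List.cons_append, List.cons_prefix_cons] at hp
  exact hM (hp.1 ▸ List.getElem_mem hi)

lemma pvSkipHyp (o : Char) (pat : List Char) {a : List Char} (x : List Char)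
    (h0 : ¬ (o :: pat) <+: (a ++ x)) (hM : o ∉ a.drop 1) :
    ∀ i, i < a.length → ¬ (o :: pat) <+: (a.drop i ++ x) := by
  intro i hi
  match i with
  | 0 => simpa using h0
  | (j+1) =>
    have hj : j < (a.drop 1).length := by simp; omega
    have := pvNoHead o pat (a.drop 1) x hM j hj
    rw [List.drop_drop] at this
    rwa [Nat.add_comm] at this

lemma pvLenRec {c : Char} {t u pre : List Char} {n : Nat} (hu : pre ++ u = c :: t)
    (hpre : 1 ≤ pre.length) (h : (c :: t).length ≤ n + 1) : u.length ≤ n := by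
  have := congrArg List.length hu
  simp at this h ⊢
  omega

lemma pvP1 : ∀ (l : List Char), pvRepl 'M' pvPat1 pvLow1 l = pvGen pvLow1 pvName2 pvName3 l := by
  suffices H : ∀ (n : Nat) (l : List Char), l.length ≤ n → pvRepl 'M' pvPat1 pvLow1 l = pvGen pvLow1 pvName2 pvName3 l by
    exact fun l => H l.length l le_rfl
  intro n
  induction n with
  | zero =>
    intro l h
    have : l = [] := List.eq_nil_of_length_eq_zero (Nat.le_zero.mp h)
    subst this; simp [pvRepl, pvGen]
  | succ n ih =>
    intro l h
    match l with
    | [] => simp [pvRepl, pvGen]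
    | c :: t =>
      by_cases h1 : pvName1 <+: (c :: t)
      · obtain ⟨u, hu⟩ := h1
        rw [← hu]
        rw [pvGen_m1, pvName1_cons, pvRepl_match,
          ih u (pvLenRec hu (by rw [pvName1_len]; omega) h)]
      · by_cases h2 : pvName2 <+: (c :: t)
        · obtain ⟨u, hu⟩ := h2
          rw [← hu] at h1 ⊢
          rw [pvGen_m2 _ _ _ _ h1]
          rw [pvName1_cons] at h1
          rw [pvRepl_skip 'M' pvPat1 pvLow1 pvName2 _ (pvSkipHyp 'M' pvPat1 _ h1 pvMnotTail2),
            ih u (pvLenRec hu (by rw [pvName2_len]; omega) h)]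
        · by_cases h3 : pvName3 <+: (c :: t)
          · obtain ⟨u, hu⟩ := h3
            rw [← hu] at h1 h2 ⊢
            rw [pvGen_m3 _ _ _ _ h1 h2]
            rw [pvName1_cons] at h1
            rw [pvRepl_skip 'M' pvPat1 pvLow1 pvName3 _ (pvSkipHyp 'M' pvPat1 _ h1 pvMnotTail3),
              ih u (pvLenRec hu (by rw [pvName3_len]; omega) h)]
          · show pvRepl 'M' pvPat1 pvLow1 (c :: t) = pvGen pvLow1 pvName2 pvName3 (c :: t)
            rw [pvGen_cons _ _ _ _ _ h1 h2 h3,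
              pvRepl_cons_of_not _ (pvName1_cons ▸ h1),
              ih t (by simpa using h)]

lemma pvQ2 : ∀ (l : List Char) (k : Nat), k < 19 → 1 ≤ k →
    pvName2.drop k <+: pvGen pvLow1 pvName2 pvName3 l → pvName2.drop k <+: l := by
  suffices H : ∀ (n : Nat) (l : List Char), l.length ≤ n → ∀ (k : Nat), k < 19 → 1 ≤ k →
      pvName2.drop k <+: pvGen pvLow1 pvName2 pvName3 l → pvName2.drop k <+: l by
    exact fun l => H l.length l le_rfl
  intro n
  induction n with
  | zero =>
    intro l h k hk hk1 hp
    have : l = [] := List.eq_nil_of_length_eq_zero (Nat.le_zero.mp h)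
    subst this
    simp [pvGen] at hp
    rw [pvName2_len] at hp; omega
  | succ n ih =>
    intro l h k hk hk1 hp
    match l with
    | [] =>
      simp [pvGen] at hp
      rw [pvName2_len] at hp; omega
    | c :: t =>
      by_cases h1 : pvName1 <+: (c :: t)
      · obtain ⟨u, hu⟩ := h1
        rw [← hu] at hp ⊢
        rw [pvGen_m1] at hp
        exact absurd (pvPrefixOfAppend hp (by simp [List.length_drop, pvName2_len, pvLow1_len]; try omega))
          (pvFactQ2a k hk hk1)
      · by_cases h2 : pvName2 <+: (c :: t)
        · obtain ⟨u, hu⟩ := h2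
          rw [← hu] at h1 hp ⊢
          rw [pvGen_m2 _ _ _ _ h1] at hp
          exact absurd (pvPrefixOfAppend hp (by simp [List.length_drop, pvName2_len]; try omega))
            (pvFactQ2b k hk hk1)
        · by_cases h3 : pvName3 <+: (c :: t)
          · obtain ⟨u, hu⟩ := h3
            rw [← hu] at h1 h2 hp ⊢
            rw [pvGen_m3 _ _ _ _ h1 h2] at hp
            exact absurd (pvPrefixOfAppend hp (by simp [List.length_drop, pvName2_len, pvName3_len]; try omega))
              (pvFactQ2c k hk hk1)
          · rw [pvGen_cons _ _ _ _ _ h1 h2 h3] at hp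
            have hk19 : k < pvName2.length := by rw [pvName2_len]; omega
            rw [List.drop_eq_getElem_cons hk19] at hp ⊢
            rw [List.cons_prefix_cons] at hp ⊢
            refine ⟨hp.1, ?_⟩
            by_cases hk' : k + 1 < 19
            · exact ih t (by simpa using h) (k + 1) hk' (by omega) hp.2
            · have hke : k = 18 := by omega
              subst hke
              have hnil : pvName2.drop (18 + 1) = [] := by decide
              rw [hnil]
              exact List.nil_prefix

lemma pvNotPrefixAppend {q a : List Char} (x : List Char) (hlen : q.length ≤ a.length)
    (h : ¬ q <+: a) : ¬ q <+: (a ++ x) := fun hp => h (pvPrefixOfAppend hp hlen)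

lemma pvPat2_eq : pvName2.drop 1 = pvPat2 := rfl
lemma pvPat3_eq : pvName3.drop 1 = pvPat3 := rfl

lemma pvReplMatchName2 (new x : List Char) :
    pvRepl 'M' pvPat2 new (pvName2 ++ x) = new ++ pvRepl 'M' pvPat2 new x := by
  rw [pvName2_cons]; exact pvRepl_match _ _ _ _

lemma pvReplMatchName3 (new x : List Char) :
    pvRepl 'M' pvPat3 new (pvName3 ++ x) = new ++ pvRepl 'M' pvPat3 new x := by
  rw [pvName3_cons]; exact pvRepl_match _ _ _ _

lemma pvP2 : ∀ (l : List Char),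
    pvRepl 'M' pvPat2 pvLow2 (pvGen pvLow1 pvName2 pvName3 l) = pvGen pvLow1 pvLow2 pvName3 l := by
  suffices H : ∀ (n : Nat) (l : List Char), l.length ≤ n →
      pvRepl 'M' pvPat2 pvLow2 (pvGen pvLow1 pvName2 pvName3 l) = pvGen pvLow1 pvLow2 pvName3 l by
    exact fun l => H l.length l le_rfl
  intro n
  induction n with
  | zero =>
    intro l h
    have : l = [] := List.eq_nil_of_length_eq_zero (Nat.le_zero.mp h)
    subst this; simp [pvRepl, pvGen]
  | succ n ih =>
    intro l h
    match l with
    | [] => simp [pvRepl, pvGen]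
    | c :: t =>
      by_cases h1 : pvName1 <+: (c :: t)
      · obtain ⟨u, hu⟩ := h1
        rw [← hu, pvGen_m1, pvGen_m1,
          pvRepl_skip 'M' pvPat2 pvLow2 pvLow1 _ (pvNoHead 'M' pvPat2 pvLow1 _ pvMnotLow1),
          ih u (pvLenRec hu (by rw [pvName1_len]; omega) h)]
      · by_cases h2 : pvName2 <+: (c :: t)
        · obtain ⟨u, hu⟩ := h2
          rw [← hu] at h1 ⊢
          rw [pvGen_m2 _ _ _ _ h1, pvGen_m2 _ _ _ _ h1, pvReplMatchName2,
            ih u (pvLenRec hu (by rw [pvName2_len]; omega) h)]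
        · by_cases h3 : pvName3 <+: (c :: t)
          · obtain ⟨u, hu⟩ := h3
            rw [← hu] at h1 h2 ⊢
            rw [pvGen_m3 _ _ _ _ h1 h2, pvGen_m3 _ _ _ _ h1 h2,
              pvRepl_skip 'M' pvPat2 pvLow2 pvName3 _
                (pvSkipHyp 'M' pvPat2 _
                  (pvNotPrefixAppend _ (by decide) (by decide)) pvMnotTail3),
              ih u (pvLenRec hu (by rw [pvName3_len]; omega) h)]
          · have hnp : ¬ ('M' :: pvPat2) <+: c :: pvGen pvLow1 pvName2 pvName3 t := by
              intro hp
              rw [List.cons_prefix_cons] at hp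
              obtain ⟨hc, hq⟩ := hp
              apply h2
              have ht : pvName2.drop 1 <+: t :=
                pvQ2 t 1 (by omega) le_rfl (by rw [pvPat2_eq]; exact hq)
              rw [pvName2_cons, ← hc, List.cons_prefix_cons]
              exact ⟨rfl, pvPat2_eq ▸ ht⟩
            rw [pvGen_cons _ _ _ _ _ h1 h2 h3, pvGen_cons _ _ _ _ _ h1 h2 h3,
              pvRepl_cons_of_not _ hnp, ih t (by simpa using h)]

lemma pvQ3 : ∀ (l : List Char) (k : Nat), k < 19 → 1 ≤ k →
    pvName3.drop k <+: pvGen pvLow1 pvLow2 pvName3 l → pvName3.drop k <+: l := by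
  suffices H : ∀ (n : Nat) (l : List Char), l.length ≤ n → ∀ (k : Nat), k < 19 → 1 ≤ k →
      pvName3.drop k <+: pvGen pvLow1 pvLow2 pvName3 l → pvName3.drop k <+: l by
    exact fun l => H l.length l le_rfl
  intro n
  induction n with
  | zero =>
    intro l h k hk hk1 hp
    have : l = [] := List.eq_nil_of_length_eq_zero (Nat.le_zero.mp h)
    subst this
    simp [pvGen] at hp
    rw [pvName3_len] at hp; omega
  | succ n ih =>
    intro l h k hk hk1 hp
    match l with
    | [] =>
      simp [pvGen] at hp
      rw [pvName3_len] at hp; omega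
    | c :: t =>
      by_cases h1 : pvName1 <+: (c :: t)
      · obtain ⟨u, hu⟩ := h1
        rw [← hu] at hp ⊢
        rw [pvGen_m1] at hp
        exact absurd (pvPrefixOfAppend hp (by simp [List.length_drop, pvName3_len, pvLow1_len]; try omega))
          (pvFactQ3a k hk hk1)
      · by_cases h2 : pvName2 <+: (c :: t)
        · obtain ⟨u, hu⟩ := h2
          rw [← hu] at h1 hp ⊢
          rw [pvGen_m2 _ _ _ _ h1] at hp
          exact absurd (pvPrefixOfAppend hp (by simp [List.length_drop, pvName3_len, pvLow2_len]; try omega))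
            (pvFactQ3b k hk hk1)
        · by_cases h3 : pvName3 <+: (c :: t)
          · obtain ⟨u, hu⟩ := h3
            rw [← hu] at h1 h2 hp ⊢
            rw [pvGen_m3 _ _ _ _ h1 h2] at hp
            exact absurd (pvPrefixOfAppend hp (by simp [List.length_drop, pvName3_len]; try omega))
              (pvFactQ3c k hk hk1)
          · rw [pvGen_cons _ _ _ _ _ h1 h2 h3] at hp
            have hk19 : k < pvName3.length := by rw [pvName3_len]; omega
            rw [List.drop_eq_getElem_cons hk19] at hp ⊢
            rw [List.cons_prefix_cons] at hp ⊢
            refine ⟨hp.1, ?_⟩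
            by_cases hk' : k + 1 < 19
            · exact ih t (by simpa using h) (k + 1) hk' (by omega) hp.2
            · have hke : k = 18 := by omega
              subst hke
              have hnil : pvName3.drop (18 + 1) = [] := by decide
              rw [hnil]
              exact List.nil_prefix

lemma pvP3 : ∀ (l : List Char),
    pvRepl 'M' pvPat3 pvLow3 (pvGen pvLow1 pvLow2 pvName3 l) = pvScan l := by
  suffices H : ∀ (n : Nat) (l : List Char), l.length ≤ n →
      pvRepl 'M' pvPat3 pvLow3 (pvGen pvLow1 pvLow2 pvName3 l) = pvScan l by
    exact fun l => H l.length l le_rfl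
  intro n
  induction n with
  | zero =>
    intro l h
    have : l = [] := List.eq_nil_of_length_eq_zero (Nat.le_zero.mp h)
    subst this; simp [pvRepl, pvGen, pvScan]
  | succ n ih =>
    intro l h
    match l with
    | [] => simp [pvRepl, pvGen, pvScan]
    | c :: t =>
      by_cases h1 : pvName1 <+: (c :: t)
      · obtain ⟨u, hu⟩ := h1
        rw [← hu, pvGen_m1, pvScan_m1,
          pvRepl_skip 'M' pvPat3 pvLow3 pvLow1 _ (pvNoHead 'M' pvPat3 pvLow1 _ pvMnotLow1),
          ih u (pvLenRec hu (by rw [pvName1_len]; omega) h)]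
      · by_cases h2 : pvName2 <+: (c :: t)
        · obtain ⟨u, hu⟩ := h2
          rw [← hu] at h1 ⊢
          rw [pvGen_m2 _ _ _ _ h1, pvScan_m2 _ h1,
            pvRepl_skip 'M' pvPat3 pvLow3 pvLow2 _ (pvNoHead 'M' pvPat3 pvLow2 _ pvMnotLow2),
            ih u (pvLenRec hu (by rw [pvName2_len]; omega) h)]
        · by_cases h3 : pvName3 <+: (c :: t)
          · obtain ⟨u, hu⟩ := h3
            rw [← hu] at h1 h2 ⊢
            rw [pvGen_m3 _ _ _ _ h1 h2, pvScan_m3 _ h1 h2, pvReplMatchName3,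
              ih u (pvLenRec hu (by rw [pvName3_len]; omega) h)]
          · have hnp : ¬ ('M' :: pvPat3) <+: c :: pvGen pvLow1 pvLow2 pvName3 t := by
              intro hp
              rw [List.cons_prefix_cons] at hp
              obtain ⟨hc, hq⟩ := hp
              apply h3
              have ht : pvName3.drop 1 <+: t :=
                pvQ3 t 1 (by omega) le_rfl (by rw [pvPat3_eq]; exact hq)
              rw [pvName3_cons, ← hc, List.cons_prefix_cons]
              exact ⟨rfl, pvPat3_eq ▸ ht⟩
            rw [pvGen_cons _ _ _ _ _ h1 h2 h3, pvScan_cons _ _ h1 h2 h3,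
              pvRepl_cons_of_not _ hnp, ih t (by simpa using h)]


lemma pvCharsMain (l : List Char) :
    PySem.Chars.replace (PySem.Chars.replace (PySem.Chars.replace l pvName1 pvLow1) pvName2 pvLow2)
      pvName3 pvLow3 = pvScan l := by
  rw [pvName1_cons, pvName2_cons, pvName3_cons, pvReplace_eq, pvReplace_eq, pvReplace_eq,
    pvP1, pvP2, pvP3]

-- ===== VERDICT (by name: the statement is the Claim_ definition above) =====
theorem lowercase_function_names_spec : Claim_equal_lowercase_function_names := by
  intro subcode _
  unfold Spec_lowercase_function_names lowercase_function_names lowercase_function_names_alt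
  simp only [List.foldl_cons, List.foldl_nil]
  simp only [PySem.Str.replace, String.toList_ofList]
  rw [show (PySem.Str.lower "MurmurHash3_x86_32").toList = pvLow1 from rfl,
    show (PySem.Str.lower "MurmurHash3_x86_128").toList = pvLow2 from rfl,
    show (PySem.Str.lower "MurmurHash3_x64_128").toList = pvLow3 from rfl,
    show ("MurmurHash3_x86_32" : String).toList = pvName1 from rfl,
    show ("MurmurHash3_x86_128" : String).toList = pvName2 from rfl,
    show ("MurmurHash3_x64_128" : String).toList = pvName3 from rfl,
    pvCharsMain]
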